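-- pv_equiv track=rewrite | github.com/naye0ng/Algorithm | OnlineCodingTest/IT_L_20/데이터베이스복구.py | solution
-- ===== SOURCE A (Python) =====
-- import heapq
--
-- def solution(dataSource, tags):
--     tags = dict.fromkeys(tags, 1)
--     h = []
--     for d in range(len(dataSource)) :
--         n = 0
--         for i in range(1, len(dataSource[d])) :
--             if dataSource[d][i] in tags :
--                 n -= 1
--         if n < 0 :
--             heapq.heappush(h, (n, dataSource[d][0]))
--     answer = []
--     for _ in range(min(10, len(h))) :
--         answer.append(heapq.heappop(h)[1])
--     return answer
-- ===== SOURCE B (Python) =====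
-- def solution(dataSource, tags):
--     tagset = set(tags)
--     candidates = []
--     for rec in dataSource:
--         count = sum(1 for f in rec[1:] if f in tagset)
--         if count > 0:
--             candidates.append((-count, rec[0]))
--     candidates.sort()
--     return [rid for _, rid in candidates[:10]]
-- ===== Notes on version B (the rewrite author's own statement) =====
-- stated objective: simpler
-- what changed: Replaces the incremental heap (heappush per record, heappop per output element) by a single candidate list built in one pass, one full sort, and a slice of the first 10 ids.
import Mathlib
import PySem

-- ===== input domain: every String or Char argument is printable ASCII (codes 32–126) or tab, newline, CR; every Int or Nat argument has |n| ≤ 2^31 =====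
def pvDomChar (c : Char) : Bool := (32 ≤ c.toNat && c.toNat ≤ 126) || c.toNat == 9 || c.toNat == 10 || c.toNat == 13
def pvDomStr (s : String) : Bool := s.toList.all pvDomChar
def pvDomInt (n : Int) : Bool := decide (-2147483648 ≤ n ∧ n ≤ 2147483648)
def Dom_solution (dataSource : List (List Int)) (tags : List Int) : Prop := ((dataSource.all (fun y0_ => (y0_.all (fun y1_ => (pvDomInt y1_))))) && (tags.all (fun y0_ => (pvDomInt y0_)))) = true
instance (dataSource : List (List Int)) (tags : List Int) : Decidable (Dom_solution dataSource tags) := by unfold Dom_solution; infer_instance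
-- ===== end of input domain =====

-- B replaces A's heap (push per record, pop per output) by build-candidates / one sort / slice; objective: simpler.

-- ===== PORT A =====
-- Python tuple '<' on (Int, Int): lexicographic.
def pairLt (a b : Int × Int) : Bool :=
  decide (a.1 < b.1) || (!decide (b.1 < a.1) && decide (a.2 < b.2))

-- heapq.heappush modelled as ordered insertion, heapq.heappop as taking the head.
-- This is exact for A's usage: the sequence of heappop results of a binary min-heap
-- is exactly the ascending order of the pushed multiset (ties here are equal tuples).
def heappush (h : List (Int × Int)) (x : Int × Int) : List (Int × Int) :=
  PySem.List.insertBy pairLt x h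

-- the 'for _ in range(k): answer.append(heappop(h)[1])' loop
def popLoop : List (Int × Int) → Nat → List Int → List Int
  | _, 0, ans => ans
  | [], _ + 1, ans => ans
  | x :: t, k + 1, ans => popLoop t k (ans ++ [x.2])

def solution (dataSource : List (List Int)) (tags : List Int) : List Int :=
  let tagsD : PySem.Dict Int Int :=
    tags.foldl (fun d k => PySem.Dict.insert d k 1) PySem.Dict.empty
  let h : List (Int × Int) :=
    (PySem.List.pyRange 0 (dataSource.length : Int) 1).foldl
      (fun h d =>
        (fun h rec =>
          let n : Int :=
            (PySem.List.pyRange 1 (rec.length : Int) 1).foldl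
              (fun n i =>
                (fun n v => if PySem.Dict.contains tagsD v then n - 1 else n) n
                  (PySem.List.pyGetD rec i 0)) 0
          if n < 0 then heappush h (n, PySem.List.pyGetD rec 0 0) else h) h
          (PySem.List.pyGetD dataSource d [])) []
  popLoop h (min 10 h.length) []

-- ===== PORT B =====
def solution_alt (dataSource : List (List Int)) (tags : List Int) : List Int :=
  let tagset : PySem.Set Int := PySem.Set.ofList tags
  let candidates : List (Int × Int) :=
    dataSource.foldl
      (fun acc rec =>
        let count : Int :=
          (PySem.List.slice rec (some 1) none).foldl
            (fun c f => if PySem.Set.contains tagset f then c + 1 else c) 0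
        if 0 < count then acc ++ [(-count, PySem.List.pyGetD rec 0 0)] else acc) []
  ((PySem.List.slice (PySem.List.sorted2 candidates Prod.fst Prod.snd) none (some 10)).map
    Prod.snd)

-- ===== PRECONDITION & SPEC =====
def Spec_solution (dataSource : List (List Int)) (tags : List Int) (out : List Int) : Prop := out = solution_alt dataSource tags
instance (dataSource : List (List Int)) (tags : List Int) (out : List Int) : Decidable (Spec_solution dataSource tags out) := by unfold Spec_solution; infer_instance

-- ===== CLAIM (what is proved, stated in full; the proofs are below) =====
def Claim_equal_solution : Prop := ∀ (dataSource : List (List Int)) (tags : List Int), Dom_solution dataSource tags → Spec_solution dataSource tags (solution dataSource tags)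

-- ===== LEMMAS AND PROOFS =====

-- membership in the dict.fromkeys(tags) dict equals membership in set(tags)
theorem contains_fromkeys_eq (tags : List Int) (v : Int) :
    PySem.Dict.contains (tags.foldl (fun d k => PySem.Dict.insert d k 1) (PySem.Dict.empty : PySem.Dict Int Int)) v
      = PySem.Set.contains (PySem.Set.ofList tags) v := by
  have hk : (tags.foldl (fun d k => PySem.Dict.insert d k 1) (PySem.Dict.empty : PySem.Dict Int Int)).keys
      = PySem.Set.update (PySem.Dict.empty : PySem.Dict Int Int).keys tags :=
    PySem.Dict.keys_foldl_insert tags (fun _ _ => (1 : Int)) PySem.Dict.empty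
  rw [PySem.Dict.contains_eq_decide_mem_keys, hk]
  simp [PySem.Set.contains, PySem.Set.update, PySem.Set.ofList, PySem.Dict.keys_empty]

-- decrement-per-hit fold is the negation of the increment-per-hit fold
theorem foldl_sub_eq_neg_add (p : Int → Bool) (l : List Int) :
    ∀ (x : Int),
      l.foldl (fun n v => if p v then n - 1 else n) (-x)
        = -(l.foldl (fun c v => if p v then c + 1 else c) x) := by
  induction l with
  | nil => intro x; rfl
  | cons a t ih =>
    intro x
    by_cases h : p a = true <;> simp only [List.foldl_cons, h, if_pos, Bool.false_eq_true, if_false]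
    · rw [show -x - 1 = -(x + 1) by ring]; exact ih (x + 1)
    · exact ih x

theorem foldl_append_acc {α : Type} (p : α → Prop) [DecidablePred p] (g : α → Int × Int) :
    ∀ (ds : List α) (a : List (Int × Int)),
      ds.foldl (fun acc r => if p r then acc ++ [g r] else acc) a
        = a ++ ds.foldl (fun acc r => if p r then acc ++ [g r] else acc) [] := by
  intro ds
  induction ds with
  | nil => intro a; simp
  | cons r t ih =>
    intro a
    simp only [List.foldl_cons]
    rw [ih, ih (if p r then [] ++ [g r] else [])]
    by_cases h : p r <;> simp [h]

theorem foldl_push_eq {α : Type} (p : α → Prop) [DecidablePred p] (g : α → Int × Int) :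
    ∀ (ds : List α) (h0 : List (Int × Int)),
      ds.foldl (fun h r => if p r then PySem.List.insertBy pairLt (g r) h else h) h0
        = (ds.foldl (fun acc r => if p r then acc ++ [g r] else acc) []).foldl
            (fun acc x => PySem.List.insertBy pairLt x acc) h0 := by
  intro ds
  induction ds with
  | nil => intro h0; rfl
  | cons r t ih =>
    intro h0
    simp only [List.foldl_cons]
    by_cases h : p r
    · simp only [if_pos h]
      simp only [List.nil_append]
      rw [ih, foldl_append_acc p g t ([g r]), List.foldl_append]
      rfl
    · simp only [if_neg h]
      exact ih h0

theorem sorted2_eq_foldl (cand : List (Int × Int)) :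
    PySem.List.sorted2 cand Prod.fst Prod.snd
      = cand.foldl (fun acc x => PySem.List.insertBy pairLt x acc) [] := by
  rfl

theorem popLoop_eq (h : List (Int × Int)) :
    ∀ (k : Nat) (ans : List Int), popLoop h k ans = ans ++ (h.take k).map Prod.snd := by
  induction h with
  | nil => intro k ans; cases k <;> simp [popLoop]
  | cons x t ih =>
    intro k ans
    cases k with
    | zero => simp [popLoop]
    | succ k => simp [popLoop, ih k]

-- ===== VERDICT (by name: the statement is the Claim_ definition above) =====
theorem take_min_ten {α : Type} (l : List α) : l.take (min 10 l.length) = l.take 10 := by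
  rw [← List.take_take, List.take_length]

theorem solution_spec : Claim_equal_solution := by
  intro ds tags _
  show solution ds tags = solution_alt ds tags
  unfold solution solution_alt
  simp only []
  set tagsD : PySem.Dict Int Int :=
    tags.foldl (fun d k => PySem.Dict.insert d k 1) PySem.Dict.empty with htagsD
  set tagset : PySem.Set Int := PySem.Set.ofList tags with htagset
  set cB : List Int → Int := fun rec =>
    (PySem.List.slice rec (some 1) none).foldl
      (fun c f => if PySem.Set.contains tagset f then c + 1 else c) 0 with hcB
  have hc : ∀ v, PySem.Dict.contains tagsD v = PySem.Set.contains tagset v := by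
    intro v; rw [htagsD, htagset]; exact contains_fromkeys_eq tags v
  have hn : ∀ rec : List Int,
      (PySem.List.pyRange 1 (rec.length : Int) 1).foldl
        (fun n i =>
          (fun n v => if PySem.Dict.contains tagsD v then n - 1 else n) n
            (PySem.List.pyGetD rec i 0)) 0 = -(cB rec) := by
    intro rec
    rw [PySem.List.foldl_pyRange_pyGetD' rec 0
      (fun n v => if PySem.Dict.contains tagsD v then n - 1 else n) 0 (by norm_num)]
    rw [hcB]
    simp only [PySem.List.slice_from_one, hc]
    have h0 : rec.drop (1 : Int).toNat = rec.tail := List.drop_one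
    rw [h0]
    simpa using foldl_sub_eq_neg_add (fun v => PySem.Set.contains tagset v) rec.tail 0
  -- outer index loop over dataSource becomes a structural fold
  rw [PySem.List.foldl_pyRange_zero_pyGetD' ds ([] : List Int)
    (fun h rec =>
      let n : Int :=
        (PySem.List.pyRange 1 (rec.length : Int) 1).foldl
          (fun n i =>
            (fun n v => if PySem.Dict.contains tagsD v then n - 1 else n) n
              (PySem.List.pyGetD rec i 0)) 0
      if n < 0 then heappush h (n, PySem.List.pyGetD rec 0 0) else h)
    ([] : List (Int × Int))]
  -- the heap-building fold is a conditional-insert fold over the candidate data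
  have hbody : ∀ (h : List (Int × Int)) (rec : List Int),
      (fun h rec =>
        let n : Int :=
          (PySem.List.pyRange 1 (rec.length : Int) 1).foldl
            (fun n i =>
              (fun n v => if PySem.Dict.contains tagsD v then n - 1 else n) n
                (PySem.List.pyGetD rec i 0)) 0
        if n < 0 then heappush h (n, PySem.List.pyGetD rec 0 0) else h) h rec
      = (fun h rec =>
          if 0 < cB rec then
            PySem.List.insertBy pairLt (-(cB rec), PySem.List.pyGetD rec 0 0) h
          else h) h rec := by
    intro h rec
    simp only [hn rec, heappush]
    split_ifs with h1 h2 h2 <;> first | rfl | omega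
  rw [funext fun h => funext fun rec => hbody h rec]
  rw [foldl_push_eq (fun rec : List Int => 0 < cB rec)
    (fun rec => (-(cB rec), PySem.List.pyGetD rec 0 0)) ds []]
  rw [← sorted2_eq_foldl]
  set cand : List (Int × Int) :=
    ds.foldl (fun acc rec => if 0 < cB rec then
      acc ++ [(-(cB rec), PySem.List.pyGetD rec 0 0)] else acc) [] with hcand
  set srt := PySem.List.sorted2 cand Prod.fst Prod.snd with hsrt
  rw [popLoop_eq srt (min 10 srt.length) [], take_min_ten srt]
  have hsl : PySem.List.slice srt none (some (10 : Int)) = srt.take (10 : Int).toNat :=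
    PySem.List.slice_to srt (by norm_num)
  rw [hsl]
  rfl
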